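-- pv_equiv track=rewrite | github.com/macginitie/pyscripts | awsiview.py | no_two_in_a_row
-- ===== SOURCE A (Python) =====
-- def no_two_in_a_row(s):
--     if len(s) < 2:
--         return True
--     s2 = s
--     for idx in range(len(s)-1):
--         if s[idx] == s2[idx+1]:
--             return False
--     return True
-- ===== SOURCE B (Python) =====
-- from itertools import groupby
--
-- def no_two_in_a_row(s):
--     return all(sum(1 for _ in g) == 1 for _, g in groupby(s))
-- ===== Notes on version B (the rewrite author's own statement) =====
-- stated objective: idiomatic
-- what changed: Replaces the explicit index-pair loop with itertools.groupby run-length grouping: collapse the string into maximal runs of equal adjacent characters and return whether every run has length 1.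
import Mathlib
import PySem

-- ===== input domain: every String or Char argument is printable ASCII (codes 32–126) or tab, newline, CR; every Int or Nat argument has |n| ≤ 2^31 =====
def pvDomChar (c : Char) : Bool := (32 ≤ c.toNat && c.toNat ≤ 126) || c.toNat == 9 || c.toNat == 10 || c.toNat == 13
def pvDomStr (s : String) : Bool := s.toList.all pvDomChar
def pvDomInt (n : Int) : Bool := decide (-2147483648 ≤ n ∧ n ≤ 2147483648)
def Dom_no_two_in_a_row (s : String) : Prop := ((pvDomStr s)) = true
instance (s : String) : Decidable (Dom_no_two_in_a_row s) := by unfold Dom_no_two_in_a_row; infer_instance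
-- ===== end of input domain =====

-- B replaces A's explicit index-pair loop by grouping the string into maximal runs of
-- equal adjacent characters and checking every run has length 1 (idiomatic; same cost).

-- ===== PORT A =====
-- the 'for idx in range(...)' loop with early 'return False'
def pvALoop (s : String) : List Int → Bool
  | [] => true
  | idx :: rest =>
    if PySem.Str.pyGet? s idx == PySem.Str.pyGet? s (idx + 1) then false
    else pvALoop s rest

def no_two_in_a_row (s : String) : Bool :=
  if PySem.Str.len s < 2 then true
  else pvALoop s (PySem.List.pyRange 0 (PySem.Str.len s - 1) 1)

-- ===== PORT B =====
-- itertools.groupby: collapse into maximal runs of equal adjacent elements (run-length pairs)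
def pvStep (c : Char) : List (Char × Nat) → List (Char × Nat)
  | [] => [(c, 1)]
  | (d, n) :: t => if c == d then (d, n + 1) :: t else (c, 1) :: (d, n) :: t

def pvGroups : List Char → List (Char × Nat)
  | [] => []
  | c :: rest => pvStep c (pvGroups rest)

-- all(sum(1 for _ in g) == 1 for _, g in groupby(s))
def no_two_in_a_row_alt (s : String) : Bool :=
  (pvGroups s.toList).all (fun g => g.2 == 1)

-- ===== PRECONDITION & SPEC =====
def Spec_no_two_in_a_row (s : String) (out : Bool) : Prop := out = no_two_in_a_row_alt s
instance (s : String) (out : Bool) : Decidable (Spec_no_two_in_a_row s out) := by unfold Spec_no_two_in_a_row; infer_instance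

-- ===== CLAIM (what is proved, stated in full; the proofs are below) =====
def Claim_equal_no_two_in_a_row : Prop := ∀ (s : String), Dom_no_two_in_a_row s → Spec_no_two_in_a_row s (no_two_in_a_row s)

-- ===== LEMMAS AND PROOFS =====

/-- reference predicate: no two adjacent equal characters -/
def pvNoAdj : List Char → Bool
  | [] => true
  | [_] => true
  | a :: b :: t => if a == b then false else pvNoAdj (b :: t)

lemma pvNoAdj_short (cs : List Char) (h : cs.length ≤ 1) : pvNoAdj cs = true := by
  match cs with
  | [] => rfl
  | [_] => rfl
  | _ :: _ :: _ => simp at h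

/-- head of pvGroups: first run carries the first character and has length ≥ 1 -/
lemma pvGroups_head (c : Char) (t : List Char) :
    ∃ n gt, pvGroups (c :: t) = (c, n) :: gt ∧ 1 ≤ n := by
  induction t generalizing c with
  | nil => exact ⟨1, [], rfl, le_refl 1⟩
  | cons d t' ih =>
    obtain ⟨m, gt, hg, hm⟩ := ih d
    show ∃ n gt', pvStep c (pvGroups (d :: t')) = (c, n) :: gt' ∧ 1 ≤ n
    rw [hg]
    by_cases hcd : c == d
    · have hce : c = d := by simpa using hcd
      subst hce
      exact ⟨m + 1, gt, by simp [pvStep], by omega⟩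
    · exact ⟨1, (d, m) :: gt, by simp [pvStep, hcd], le_refl 1⟩

/-- B computes the adjacent-distinctness predicate -/
lemma pvGroups_all (cs : List Char) :
    (pvGroups cs).all (fun g => g.2 == 1) = pvNoAdj cs := by
  induction cs with
  | nil => rfl
  | cons c t ih =>
    match t with
    | [] => rfl
    | d :: t' =>
      obtain ⟨m, gt, hg, hm⟩ := pvGroups_head d t'
      show (pvStep c (pvGroups (d :: t'))).all (fun g => g.2 == 1) = pvNoAdj (c :: d :: t')
      rw [hg]
      by_cases hcd : c == d
      · have hce : c = d := by simpa using hcd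
        subst hce
        have h1 : ((m + 1 : Nat) == 1) = false := by
          simp only [beq_eq_false_iff_ne, ne_eq]; omega
        simp [pvStep, pvNoAdj, h1]
      · rw [show pvNoAdj (c :: d :: t') = pvNoAdj (d :: t') from by simp [pvNoAdj, hcd],
          ← ih, hg]
        simp [pvStep, hcd]

/-- A's loop from index k checks pvNoAdj of the tail from k -/
lemma pvALoop_eq (s : String) (k : Nat) :
    pvALoop s (PySem.List.pyRange (k : Int) ((s.toList.length : Int) - 1) 1)
      = pvNoAdj (s.toList.drop k) := by
  generalize h : s.toList.length - 1 - k = fuel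
  induction fuel generalizing k with
  | zero =>
    have hk : (s.toList.length : Int) - 1 ≤ (k : Int) := by omega
    rw [PySem.List.pyRange_one_eq_nil hk]
    have hle : (s.toList.drop k).length ≤ 1 := by
      rw [List.length_drop]; omega
    rw [pvNoAdj_short _ hle]; rfl
  | succ m ih =>
    have hk : (k : Int) < (s.toList.length : Int) - 1 := by omega
    have hk1 : k < s.toList.length := by omega
    have hk2 : k + 1 < s.toList.length := by omega
    have hcast : ((k : Int) + 1) = (((k + 1 : Nat)) : Int) := by push_cast; ring
    have hget : PySem.Str.pyGet? s (k : Int) = some s.toList[k] := by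
      rw [PySem.Str.pyGet?_natCast, List.getElem?_eq_getElem hk1]
    have hget2 : PySem.Str.pyGet? s (((k + 1 : Nat)) : Int) = some s.toList[k + 1] := by
      rw [PySem.Str.pyGet?_natCast, List.getElem?_eq_getElem hk2]
    have hdrop : s.toList.drop k = s.toList[k] :: s.toList.drop (k + 1) :=
      List.drop_eq_getElem_cons hk1
    have hdrop2 : s.toList.drop (k + 1) = s.toList[k + 1] :: s.toList.drop (k + 2) :=
      List.drop_eq_getElem_cons hk2
    rw [PySem.List.pyRange_one_cons hk, pvALoop, hcast, hget, hget2]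
    by_cases heq : s.toList[k] == s.toList[k + 1]
    · rw [hdrop, hdrop2]
      simp [pvNoAdj, heq]
    · have hih := ih (k + 1) (by omega)
      rw [hdrop]
      rw [show pvNoAdj (s.toList[k] :: s.toList.drop (k + 1))
            = pvNoAdj (s.toList[k] :: s.toList[k + 1] :: s.toList.drop (k + 2)) from by rw [← hdrop2]]
      simp only [pvNoAdj, heq, Bool.false_eq_true, if_neg, not_false_eq_true,
        Option.some_beq_some]
      rw [← hdrop2, hih]

lemma no_two_eq_noAdj (s : String) : no_two_in_a_row s = pvNoAdj s.toList := by
  unfold no_two_in_a_row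
  by_cases h : PySem.Str.len s < 2
  · rw [if_pos h]
    have hl : s.toList.length ≤ 1 := by
      have := PySem.Str.len_eq s
      omega
    exact (pvNoAdj_short _ hl).symm
  · rw [if_neg h]
    have hl : PySem.Str.len s = (s.toList.length : Int) := PySem.Str.len_eq s
    rw [show (0 : Int) = ((0 : Nat) : Int) from rfl, hl, pvALoop_eq s 0, List.drop_zero]

-- ===== VERDICT (by name: the statement is the Claim_ definition above) =====
theorem no_two_in_a_row_spec : Claim_equal_no_two_in_a_row := by
  intro s _
  unfold Spec_no_two_in_a_row no_two_in_a_row_alt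
  rw [no_two_eq_noAdj, pvGroups_all]
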